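-- pv_equiv track=rewrite | github.com/bjornslib/cobuilder-harness | cobuilder/engine/pipeline_runner.py | _is_pipeline_complete
-- ===== SOURCE A (Python) =====
-- def _is_pipeline_complete(nodes: list[dict]) -> bool:
--     """Return True when all exit nodes have reached 'validated' or 'accepted'."""
--     exit_nodes = [n for n in nodes if n["attrs"].get("handler") == "exit"
--                   or n["attrs"].get("shape") == "Msquare"]
--     if not exit_nodes:
--         # No exit node — check if ALL nodes are in a terminal state
--         terminal = {"validated", "accepted", "failed"}
--         return all(n["attrs"].get("status", "pending") in terminal for n in nodes)
--     return all(
--         n["attrs"].get("status", "pending") in ("validated", "accepted")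
--         for n in exit_nodes
--     )
-- ===== SOURCE B (Python) =====
-- def _is_pipeline_complete(nodes: list[dict]) -> bool:
--     """Phase-switching scan with early exit: look for the first exit node while
--     tracking terminality; once one is found, only exit nodes are checked and the
--     scan stops at the first offender."""
--     it = iter(nodes)
--     all_terminal = True
--     for n in it:
--         a = n["attrs"]
--         if a.get("handler") == "exit" or a.get("shape") == "Msquare":
--             # Exit phase: this and every later exit node must be validated/accepted.
--             if a.get("status", "pending") not in ("validated", "accepted"):
--                 return False
--             for m in it:
--                 b = m["attrs"]
--                 if (b.get("handler") == "exit" or b.get("shape") == "Msquare") \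
--                         and b.get("status", "pending") not in ("validated", "accepted"):
--                     return False
--             return True
--         all_terminal = all_terminal and a.get("status", "pending") in ("validated", "accepted", "failed")
--     return all_terminal
-- ===== Notes on version B (the rewrite author's own statement) =====
-- stated objective: alternative
-- what changed: Replaces A's build-exit-list-then-scan with a phase-switching single scan over one iterator: search for the first exit node while tracking terminality, then switch to an exit-only phase over the remaining iterator that returns False at the first bad exit node (early exit, no intermediate list).
import Mathlib
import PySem

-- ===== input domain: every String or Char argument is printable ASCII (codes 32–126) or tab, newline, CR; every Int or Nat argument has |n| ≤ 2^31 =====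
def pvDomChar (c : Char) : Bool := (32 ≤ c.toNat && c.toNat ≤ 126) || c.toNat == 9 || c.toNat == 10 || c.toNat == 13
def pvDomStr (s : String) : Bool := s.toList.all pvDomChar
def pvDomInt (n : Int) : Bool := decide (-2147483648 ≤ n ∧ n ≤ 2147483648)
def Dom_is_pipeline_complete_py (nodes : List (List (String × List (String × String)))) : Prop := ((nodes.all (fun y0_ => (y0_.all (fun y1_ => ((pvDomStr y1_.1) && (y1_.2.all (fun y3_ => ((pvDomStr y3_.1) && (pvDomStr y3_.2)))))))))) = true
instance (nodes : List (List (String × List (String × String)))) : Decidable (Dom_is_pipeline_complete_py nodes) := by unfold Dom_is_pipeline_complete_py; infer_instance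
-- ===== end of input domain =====

-- B replaces A's build-exit-list-then-scan with a phase-switching scan (find the
-- first exit node while tracking terminality, then check only exit nodes with early
-- exit); Pre_ excludes nodes missing the "attrs" key, on which Python A raises KeyError.


-- ===== PORT A =====
-- n["attrs"]: KeyError (none) when missing; excluded by Pre_, the `.getD []` arm is unreachable there.
def pvAttrs (n : List (String × List (String × String))) : List (String × String) :=
  ((PySem.Dict.mk n).get? "attrs").getD []

def pvIsExit (n : List (String × List (String × String))) : Bool :=
  (PySem.Dict.mk (pvAttrs n)).get? "handler" == some "exit"
    || (PySem.Dict.mk (pvAttrs n)).get? "shape" == some "Msquare"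

def pvStatus (n : List (String × List (String × String))) : String :=
  (PySem.Dict.mk (pvAttrs n)).getD "status" "pending"

def is_pipeline_complete_py (nodes : List (List (String × List (String × String)))) : Bool :=
  let exit_nodes := nodes.filter pvIsExit
  if exit_nodes.isEmpty then
    nodes.all (fun n =>
      pvStatus n == "validated" || pvStatus n == "accepted" || pvStatus n == "failed")
  else
    exit_nodes.all (fun n => pvStatus n == "validated" || pvStatus n == "accepted")

-- ===== PORT B =====
-- Exit phase: the inner `for m in it` loop — return False at the first bad exit node.
def pvExitPhase : List (List (String × List (String × String))) → Bool
  | [] => true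
  | m :: rest =>
    if pvIsExit m && !(pvStatus m == "validated" || pvStatus m == "accepted") then false
    else pvExitPhase rest

-- Search phase: the outer loop — look for the first exit node, tracking all_terminal.
def pvSearchPhase : List (List (String × List (String × String))) → Bool → Bool
  | [], all_terminal => all_terminal
  | n :: rest, all_terminal =>
    if pvIsExit n then
      if !(pvStatus n == "validated" || pvStatus n == "accepted") then false
      else pvExitPhase rest
    else
      pvSearchPhase rest (all_terminal
        && (pvStatus n == "validated" || pvStatus n == "accepted" || pvStatus n == "failed"))

def is_pipeline_complete_py_alt (nodes : List (List (String × List (String × String)))) : Bool :=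
  pvSearchPhase nodes true

-- ===== PRECONDITION & SPEC =====
-- Pre_ excludes exactly the nodes without an "attrs" key, on which Python A raises KeyError.
def Pre_is_pipeline_complete_py (nodes : List (List (String × List (String × String)))) : Prop :=
  ∀ n ∈ nodes, ((PySem.Dict.mk n).get? "attrs").isSome = true
instance (nodes : List (List (String × List (String × String)))) : Decidable (Pre_is_pipeline_complete_py nodes) := by unfold Pre_is_pipeline_complete_py; infer_instance

def pvWitness_is_pipeline_complete_py : (List (List (String × List (String × String)))) :=
  [[("attrs", [("handler", "exit"), ("status", "validated")])], [("attrs", [])]]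

def Spec_is_pipeline_complete_py (nodes : List (List (String × List (String × String)))) (out : Bool) : Prop := out = is_pipeline_complete_py_alt nodes
instance (nodes : List (List (String × List (String × String)))) (out : Bool) : Decidable (Spec_is_pipeline_complete_py nodes out) := by unfold Spec_is_pipeline_complete_py; infer_instance

-- ===== CLAIM (what is proved, stated in full; the proofs are below) =====
def Claim_equal_is_pipeline_complete_py : Prop := ∀ (nodes : List (List (String × List (String × String)))), Dom_is_pipeline_complete_py nodes → Pre_is_pipeline_complete_py nodes → Spec_is_pipeline_complete_py nodes (is_pipeline_complete_py nodes)

-- ===== LEMMAS AND PROOFS =====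
-- The exit phase checks exactly "all exit nodes are validated/accepted".
theorem pvExitPhase_eq (l : List (List (String × List (String × String)))) :
    pvExitPhase l
      = (l.filter pvIsExit).all (fun n => pvStatus n == "validated" || pvStatus n == "accepted") := by
  induction l with
  | nil => rfl
  | cons m rest ih =>
    by_cases h : pvIsExit m = true
    · rw [pvExitPhase, List.filter_cons_of_pos h]
      simp only [h, Bool.true_and, List.all_cons, ih]
      cases hs : (pvStatus m == "validated" || pvStatus m == "accepted") <;> simp [hs]
    · simp [pvExitPhase, h, List.filter_cons_of_neg h, ih]

-- The search phase computes A's answer, with `all_terminal` the accumulated prefix.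
theorem pvSearchPhase_eq (l : List (List (String × List (String × String)))) (acc : Bool) :
    pvSearchPhase l acc
      = if (l.filter pvIsExit).isEmpty then
          acc && l.all (fun n =>
            pvStatus n == "validated" || pvStatus n == "accepted" || pvStatus n == "failed")
        else
          (l.filter pvIsExit).all (fun n => pvStatus n == "validated" || pvStatus n == "accepted") := by
  induction l generalizing acc with
  | nil => simp [pvSearchPhase]
  | cons n rest ih =>
    by_cases h : pvIsExit n = true
    · simp only [pvSearchPhase, h, if_true, List.filter_cons_of_pos h, List.isEmpty_cons,
        List.all_cons]
      cases hs : (pvStatus n == "validated" || pvStatus n == "accepted") <;>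
        simp [hs, pvExitPhase_eq]

    · simp [pvSearchPhase, h, ih, List.filter_cons_of_neg h, Bool.and_assoc]

-- ===== VERDICT (by name: the statement is the Claim_ definition above) =====
theorem is_pipeline_complete_py_spec : Claim_equal_is_pipeline_complete_py := by
  intro nodes _ _
  unfold Spec_is_pipeline_complete_py is_pipeline_complete_py is_pipeline_complete_py_alt
  rw [pvSearchPhase_eq]
  simp
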